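-- pv_equiv track=rewrite | github.com/kyrolyte/py-bin | chss/file_fmt_chss_paragraphedit.py | find_break_after_mid
-- ===== SOURCE A (Python) =====
-- def is_sentence_terminator(ch):
--     return ch in '.!?'
--
-- def find_break_after_mid(line, mid, max_search=None):
--     """
--     Find the earliest sentence break after mid that is not inside a quotation.
--     Returns the index to break at (the position after the break character), or None.
--     """
--     if max_search is None:
--         max_search = len(line)
--
--     i = mid
--     quotes = {'"': False, "'": False}
--
--     while i < max_search:
--         ch = line[i]
--
--         # Update quote state
--         if ch == '"' and not (i > 0 and line[i - 1] == '\\'):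
--             quotes['"'] = not quotes['"']
--         elif ch == "'" and not (i > 0 and line[i - 1] == '\\'):
--             quotes["'"] = not quotes["'"]
--
--         # Check for sentence terminator
--         if is_sentence_terminator(ch):
--             next_is_space = (i + 1 < len(line)) and line[i + 1].isspace()
--             end_of_line = i + 1 == len(line)
--             in_any_quote = quotes['"'] or quotes["'"]
--             if (next_is_space or end_of_line) and not in_any_quote:
--                 return i + 1
--         i += 1
--     return None
-- ===== SOURCE B (Python) =====
-- def is_sentence_terminator(ch):
--     return ch in '.!?'
--
-- def find_break_after_mid(line, mid, max_search=None):
--     """Stateless version: no running quote state; for each candidate break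
--     position, recompute the unescaped-quote parity of the scanned window."""
--     if max_search is None:
--         max_search = len(line)
--     n = len(line)
--     i = mid
--     while i < max_search:
--         ch = line[i]
--         if is_sentence_terminator(ch) and (i + 1 == n or (i + 1 < n and line[i + 1].isspace())):
--             dq = sq = False
--             for j in range(mid, i + 1):
--                 c = line[j]
--                 if c == '"' and not (j > 0 and line[j - 1] == '\\'):
--                     dq = not dq
--                 elif c == "'" and not (j > 0 and line[j - 1] == '\\'):
--                     sq = not sq
--             if not (dq or sq):
--                 return i + 1
--         i += 1
--     return None
-- ===== Notes on version B (the rewrite author's own statement) =====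
-- stated objective: alternative
-- what changed: A's running quote-state carried across the whole scan is removed: B scans for candidate terminator positions only and, at each candidate, recomputes the unescaped-quote parity of the window from scratch, so no quote state is threaded through the main loop.
-- outside the precondition, e.g. on find_break_after_mid('a. b', 0, 10): A returns 2, B returns 2
import Mathlib
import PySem

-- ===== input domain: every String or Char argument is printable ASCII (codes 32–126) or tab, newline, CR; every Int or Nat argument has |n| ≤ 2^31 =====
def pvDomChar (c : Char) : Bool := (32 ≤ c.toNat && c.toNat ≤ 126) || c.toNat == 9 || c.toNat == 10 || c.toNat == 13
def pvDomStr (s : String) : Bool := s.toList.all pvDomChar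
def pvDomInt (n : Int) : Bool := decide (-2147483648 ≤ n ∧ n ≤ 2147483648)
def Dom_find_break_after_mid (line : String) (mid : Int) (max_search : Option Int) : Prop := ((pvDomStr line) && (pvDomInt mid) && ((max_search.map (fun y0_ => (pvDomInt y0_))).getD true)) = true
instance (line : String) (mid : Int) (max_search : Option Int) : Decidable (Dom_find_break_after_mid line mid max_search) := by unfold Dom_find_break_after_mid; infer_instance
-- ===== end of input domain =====

-- B drops A's running quote state: it scans for candidate terminators and recomputes the unescaped-quote parity of the window per candidate; objective: alternative decomposition.


-- ===== PORT A =====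
def is_sentence_terminator (ch : Char) : Bool := (".!?".toList).contains ch

-- A's while-loop; fuel = (max_search - i).toNat at entry, so 'fuel = 0' is exactly '¬ i < max_search'.
def fbamLoopA (cs : List Char) (fuel : Nat) (i : Int) (dq sq : Bool) : Option Int :=
  match fuel with
  | 0 => none
  | fuel' + 1 =>
    match PySem.List.pyGet? cs i with
    | none => none   -- Python raises IndexError here; excluded by Pre_
    | some ch =>
      let escaped : Bool := decide (0 < i) && (PySem.List.pyGet? cs (i - 1) == some '\\')
      let dq' := if ch == '"' && !escaped then !dq else dq
      let sq' := if !(ch == '"' && !escaped) && (ch == '\'' && !escaped) then !sq else sq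
      if is_sentence_terminator ch then
        let next_is_space : Bool :=
          decide (i + 1 < (cs.length : Int)) && ((PySem.List.pyGet? cs (i + 1)).any PySem.Chars.isspace)
        let end_of_line : Bool := i + 1 == (cs.length : Int)
        let in_any_quote : Bool := dq' || sq'
        if (next_is_space || end_of_line) && !in_any_quote then some (i + 1)
        else fbamLoopA cs fuel' (i + 1) dq' sq'
      else fbamLoopA cs fuel' (i + 1) dq' sq'

def find_break_after_mid (line : String) (mid : Int) (max_search : Option Int) : Option Int :=
  let cs := line.toList
  let ms : Int := max_search.getD (cs.length : Int)
  fbamLoopA cs (ms - mid).toNat mid false false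

-- ===== PORT B =====
-- B's inner for-loop over range(mid, i+1): fresh quote parity of the window (none = IndexError).
def fbamParity (cs : List Char) (fuel : Nat) (j : Int) (dq sq : Bool) : Option (Bool × Bool) :=
  match fuel with
  | 0 => some (dq, sq)
  | fuel' + 1 =>
    match PySem.List.pyGet? cs j with
    | none => none   -- Python raises IndexError here; excluded by Pre_
    | some c =>
      let escaped : Bool := decide (0 < j) && (PySem.List.pyGet? cs (j - 1) == some '\\')
      let dq' := if c == '"' && !escaped then !dq else dq
      let sq' := if !(c == '"' && !escaped) && (c == '\'' && !escaped) then !sq else sq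
      fbamParity cs fuel' (j + 1) dq' sq'

-- B's outer while-loop: candidates only; no quote state is threaded through it.
def fbamLoopB (cs : List Char) (fuel : Nat) (i mid : Int) : Option Int :=
  match fuel with
  | 0 => none
  | fuel' + 1 =>
    match PySem.List.pyGet? cs i with
    | none => none   -- Python raises IndexError here; excluded by Pre_
    | some ch =>
      if is_sentence_terminator ch &&
         ((i + 1 == (cs.length : Int)) ||
          (decide (i + 1 < (cs.length : Int)) && ((PySem.List.pyGet? cs (i + 1)).any PySem.Chars.isspace))) then
        match fbamParity cs (i + 1 - mid).toNat mid false false with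
        | none => none
        | some (dq, sq) =>
          if !(dq || sq) then some (i + 1) else fbamLoopB cs fuel' (i + 1) mid
      else fbamLoopB cs fuel' (i + 1) mid

def find_break_after_mid_alt (line : String) (mid : Int) (max_search : Option Int) : Option Int :=
  let cs := line.toList
  let ms : Int := max_search.getD (cs.length : Int)
  fbamLoopB cs (ms - mid).toNat mid mid

-- ===== PRECONDITION & SPEC =====
-- Pre_ excludes the inputs on which A can raise IndexError (a window reaching outside the
-- string): it conservatively requires mid ≥ -len and effective max_search ≤ len whenever the
-- loop runs at all, since 'A finds a break before falling off the end' is not a closed-form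
-- condition; on the conservatively excluded inputs where A does return, B returns the same
-- value (see cite in claim.json).
def Pre_find_break_after_mid (line : String) (mid : Int) (max_search : Option Int) : Prop :=
  mid < max_search.getD (line.toList.length : Int) →
    (-(line.toList.length : Int) ≤ mid ∧ max_search.getD (line.toList.length : Int) ≤ (line.toList.length : Int))
instance (line : String) (mid : Int) (max_search : Option Int) : Decidable (Pre_find_break_after_mid line mid max_search) := by unfold Pre_find_break_after_mid; infer_instance

def pvWitness_find_break_after_mid : String × Int × Option Int := ("He said \"hi.\" now. ok", 3, none)

def Spec_find_break_after_mid (line : String) (mid : Int) (max_search : Option Int) (out : Option Int) : Prop := out = find_break_after_mid_alt line mid max_search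
instance (line : String) (mid : Int) (max_search : Option Int) (out : Option Int) : Decidable (Spec_find_break_after_mid line mid max_search out) := by unfold Spec_find_break_after_mid; infer_instance

-- ===== CLAIM (what is proved, stated in full; the proofs are below) =====
def Claim_equal_find_break_after_mid : Prop := ∀ (line : String) (mid : Int) (max_search : Option Int), Dom_find_break_after_mid line mid max_search → Pre_find_break_after_mid line mid max_search → Spec_find_break_after_mid line mid max_search (find_break_after_mid line mid max_search)

-- ===== LEMMAS AND PROOFS =====

-- One-step unfolding of the fresh-parity loop (first character of the window).
lemma fbamParity_cons (cs : List Char) (fuel : Nat) (j : Int) (dq sq : Bool) :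
    fbamParity cs (fuel + 1) j dq sq =
      match PySem.List.pyGet? cs j with
      | none => none
      | some c =>
        let escaped : Bool := decide (0 < j) && (PySem.List.pyGet? cs (j - 1) == some '\\')
        let dq' := if c == '"' && !escaped then !dq else dq
        let sq' := if !(c == '"' && !escaped) && (c == '\'' && !escaped) then !sq else sq
        fbamParity cs fuel (j + 1) dq' sq' := rfl

-- Peeling the LAST step off the fresh-parity loop: parity over fuel+1 characters is parity
-- over fuel characters followed by one update at index j+fuel.
lemma fbamParity_snoc (cs : List Char) :
    ∀ (fuel : Nat) (j : Int) (dq sq : Bool),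
      fbamParity cs (fuel + 1) j dq sq =
        (fbamParity cs fuel j dq sq).bind (fun st =>
          match PySem.List.pyGet? cs (j + (fuel : Int)) with
          | none => none
          | some c =>
            let escaped : Bool := decide (0 < j + (fuel : Int)) && (PySem.List.pyGet? cs (j + (fuel : Int) - 1) == some '\\')
            let dq' := if c == '"' && !escaped then !st.1 else st.1
            let sq' := if !(c == '"' && !escaped) && (c == '\'' && !escaped) then !st.2 else st.2
            some (dq', sq')) := by
  intro fuel
  induction fuel with
  | zero =>
    intro j dq sq
    rw [fbamParity_cons]
    rcases h : PySem.List.pyGet? cs j with _ | c <;> simp [h, fbamParity]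
  | succ fuel' ih =>
    intro j dq sq
    rw [fbamParity_cons]
    conv_rhs => rw [fbamParity_cons]
    rcases h : PySem.List.pyGet? cs j with _ | c
    · simp
    · simp only
      rw [ih]
      have heq : (j + 1) + (fuel' : Int) = j + ((fuel' + 1 : Nat) : Int) := by push_cast; ring
      rw [heq]

-- Main invariant: if (dq,sq) is exactly the fresh parity of the window [mid, i), then A's
-- running loop and B's candidate loop agree, provided the remaining window stays in range.
lemma fbam_loops_agree (cs : List Char) :
    ∀ (fuel : Nat) (i mid : Int) (dq sq : Bool),
      mid ≤ i →
      fbamParity cs (i - mid).toNat mid false false = some (dq, sq) →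
      (fuel = 0 ∨ (-(cs.length : Int) ≤ i ∧ i + (fuel : Int) ≤ (cs.length : Int))) →
      fbamLoopA cs fuel i dq sq = fbamLoopB cs fuel i mid := by
  intro fuel
  induction fuel with
  | zero => intro i mid dq sq _ _ _; rfl
  | succ fuel' ih =>
    intro i mid dq sq hmi hpar hb
    rcases hb with h0 | ⟨hlo, hhi⟩
    · exact absurd h0 (Nat.succ_ne_zero fuel')
    have hilt : i < (cs.length : Int) := by push_cast at hhi ⊢; omega
    obtain ⟨ch, hch⟩ : ∃ ch, PySem.List.pyGet? cs i = some ch := by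
      rcases h : PySem.List.pyGet? cs i with _ | ch
      · rw [PySem.List.pyGet?_eq_none_iff] at h
        exact absurd ⟨hlo, hilt⟩ h
      · exact ⟨ch, rfl⟩
    set escaped : Bool := decide (0 < i) && (PySem.List.pyGet? cs (i - 1) == some '\\') with hesc
    set dq' : Bool := if ch == '"' && !escaped then !dq else dq with hdq
    set sq' : Bool := if !(ch == '"' && !escaped) && (ch == '\'' && !escaped) then !sq else sq with hsq
    -- the fresh parity of the extended window [mid, i+1) is (dq', sq')
    have hpar' : fbamParity cs (i + 1 - mid).toNat mid false false = some (dq', sq') := by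
      have hn : (i + 1 - mid).toNat = (i - mid).toNat + 1 := by omega
      rw [hn, fbamParity_snoc, hpar]
      have hmi2 : mid + (((i - mid).toNat : Nat) : Int) = i := by omega
      simp only [Option.bind, hmi2, hch, ← hesc, ← hdq, ← hsq]
    have hrec : fbamLoopA cs fuel' (i + 1) dq' sq' = fbamLoopB cs fuel' (i + 1) mid := by
      apply ih (i + 1) mid dq' sq' (by omega) hpar'
      by_cases hf : fuel' = 0
      · exact Or.inl hf
      · right; constructor <;> [omega; (push_cast at hhi ⊢; omega)]
    simp only [fbamLoopA, fbamLoopB, hch, ← hesc, ← hdq, ← hsq]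
    by_cases hterm : is_sentence_terminator ch
    all_goals by_cases hq : (dq' || sq') = true
    all_goals by_cases heol : (i + 1 == (cs.length : Int)) = true
    all_goals by_cases hsp : (decide (i + 1 < (cs.length : Int)) && ((PySem.List.pyGet? cs (i + 1)).any PySem.Chars.isspace)) = true
    all_goals simp [hterm, hq, heol, hsp, hpar', hrec]

-- ===== VERDICT (by name: the statement is the Claim_ definition above) =====
theorem find_break_after_mid_spec : Claim_equal_find_break_after_mid := by
  intro line mid max_search _ hpre
  unfold Spec_find_break_after_mid find_break_after_mid find_break_after_mid_alt
  show fbamLoopA line.toList ((max_search.getD (line.toList.length : Int)) - mid).toNat mid false false =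
       fbamLoopB line.toList ((max_search.getD (line.toList.length : Int)) - mid).toNat mid mid
  by_cases hrun : mid < max_search.getD (line.toList.length : Int)
  · obtain ⟨hlo, hhi⟩ := hpre hrun
    refine fbam_loops_agree line.toList _ mid mid false false le_rfl ?_ ?_
    · have h0 : (mid - mid).toNat = 0 := by omega
      rw [h0]; rfl
    · right; exact ⟨hlo, by omega⟩
  · have h0 : ((max_search.getD (line.toList.length : Int)) - mid).toNat = 0 := by omega
    rw [h0]; rfl
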